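-- pv_equiv track=rewrite | github.com/MatthiasWikenheiser/goal_recognition | rl_planner.py | _remove_circular_states_indices
-- ===== SOURCE A (Python) =====
-- def _remove_circular_states_indices(states):
--     seen_states = {}
--     clean_indices = []
--
--     for index, state in enumerate(states):
--         if state in seen_states:
--             # If a circular state is detected, remove all elements up to the first occurrence of that state
--             first_occurrence = seen_states[state]
--             clean_indices = [i for i in clean_indices if i <= first_occurrence]
--             # Update seen_states to reflect only the remaining indices
--             seen_states = {states[i]: i for i in clean_indices}
--         # Append the current index and update seen_states
--         else:
--             clean_indices.append(index)
--             seen_states[state] = index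
--
--     return clean_indices
-- ===== SOURCE B (Python) =====
-- def _remove_circular_states_indices(states):
--     # Stack of (index, state) pairs plus a state->index map; on a repeated
--     # state pop everything after its first occurrence (amortized O(n)).
--     stack = []
--     pos = {}
--     for index, state in enumerate(states):
--         if state in pos:
--             first = pos[state]
--             while stack and stack[-1][0] > first:
--                 _, s = stack.pop()
--                 del pos[s]
--         else:
--             stack.append((index, state))
--             pos[state] = index
--     return [i for i, _ in stack]
-- ===== Notes on version B (the rewrite author's own statement) =====
-- stated objective: faster
-- what changed: Replaces A's per-repeat full filter of clean_indices plus complete dict rebuild with a stack of (index, state) pairs and a state->index map from which entries after the first occurrence are popped and deleted, giving an amortized single pass.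
import Mathlib
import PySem

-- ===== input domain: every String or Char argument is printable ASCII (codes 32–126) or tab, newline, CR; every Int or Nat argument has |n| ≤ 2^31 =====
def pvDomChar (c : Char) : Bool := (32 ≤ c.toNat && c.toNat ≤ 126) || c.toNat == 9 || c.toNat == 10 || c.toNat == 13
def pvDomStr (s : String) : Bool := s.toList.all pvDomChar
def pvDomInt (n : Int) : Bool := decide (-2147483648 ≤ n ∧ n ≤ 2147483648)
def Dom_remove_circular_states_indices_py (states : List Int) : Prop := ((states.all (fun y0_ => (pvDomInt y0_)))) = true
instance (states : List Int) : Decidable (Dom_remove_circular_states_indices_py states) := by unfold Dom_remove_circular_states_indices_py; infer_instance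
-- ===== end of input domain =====

-- B replaces A's repeated full-list filter + dict rebuild by a stack with a
-- state→index map that pops back to the first occurrence (amortized single pass).


-- ===== PORT A =====
-- loop body of A's 'for index, state in enumerate(states)' (acc = (seen_states, clean_indices))
def pvStepA (states : List Int) (acc : PySem.Dict Int Int × List Int) (p : Int × Int) :
    PySem.Dict Int Int × List Int :=
  if acc.1.contains p.2 then
    -- first_occurrence = seen_states[state]: the key is present, so getD is exact (no KeyError)
    let f := acc.1.getD p.2 0
    let clean := acc.2.filter (fun i => decide (i ≤ f))
    -- seen_states = {states[i]: i for i in clean_indices}: every i is a valid index, so pyGetD is exact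
    (clean.foldl (fun d i => d.insert (PySem.List.pyGetD states i 0) i) PySem.Dict.empty, clean)
  else
    (acc.1.insert p.2 p.1, acc.2 ++ [p.1])

def remove_circular_states_indices_py (states : List Int) : List Int :=
  ((PySem.List.enumerate states).foldl (pvStepA states) (PySem.Dict.empty, [])).2

-- ===== PORT B =====
-- B's 'while stack and stack[-1][0] > first: _, s = stack.pop(); del pos[s]'
def pvPopCycle (first : Int) (stack : List (Int × Int)) (pos : PySem.Dict Int Int) :
    List (Int × Int) × PySem.Dict Int Int :=
  match h : stack.getLast? with
  | some p => if first < p.1 then pvPopCycle first stack.dropLast (pos.erase p.2) else (stack, pos)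
  | none => (stack, pos)
termination_by stack.length
decreasing_by
  have hne : stack ≠ [] := by rintro rfl; simp at h
  have hpos := List.length_pos_of_ne_nil hne
  simp only [List.length_dropLast]
  omega

-- loop body of B's 'for index, state in enumerate(states)' (acc = (stack, pos))
def pvStepB (acc : List (Int × Int) × PySem.Dict Int Int) (p : Int × Int) :
    List (Int × Int) × PySem.Dict Int Int :=
  if acc.2.contains p.2 then
    pvPopCycle (acc.2.getD p.2 0) acc.1 acc.2
  else
    (acc.1 ++ [p], acc.2.insert p.2 p.1)

def remove_circular_states_indices_py_alt (states : List Int) : List Int :=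
  (((PySem.List.enumerate states).foldl pvStepB ([], PySem.Dict.empty)).1).map (·.1)

-- ===== PRECONDITION & SPEC =====
def Spec_remove_circular_states_indices_py (states : List Int) (out : List Int) : Prop := out = remove_circular_states_indices_py_alt states
instance (states : List Int) (out : List Int) : Decidable (Spec_remove_circular_states_indices_py states out) := by unfold Spec_remove_circular_states_indices_py; infer_instance

-- ===== CLAIM (what is proved, stated in full; the proofs are below) =====
def Claim_equal_remove_circular_states_indices_py : Prop := ∀ (states : List Int), Dom_remove_circular_states_indices_py states → Spec_remove_circular_states_indices_py states (remove_circular_states_indices_py states)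

-- ===== LEMMAS AND PROOFS =====

-- the dict that both loops carry, as a function of the kept (index, state) pairs
def pvSeen (kept : List (Int × Int)) : PySem.Dict Int Int :=
  PySem.Dict.mk (kept.map (fun p => (p.2, p.1)))

-- one loop step, on the kept pairs alone
def pvAbs (kept : List (Int × Int)) (p : Int × Int) : List (Int × Int) :=
  if (pvSeen kept).contains p.2 then
    kept.filter (fun q => decide (q.1 ≤ (pvSeen kept).getD p.2 0))
  else kept ++ [p]

-- loop invariant: indices strictly increasing, states distinct, pairs read off `states`
def pvInv (states : List Int) (kept : List (Int × Int)) : Prop :=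
  kept.Pairwise (fun a b => a.1 < b.1) ∧ (kept.map Prod.snd).Nodup ∧
    ∀ q ∈ kept, PySem.List.pyGetD states q.1 0 = q.2

lemma pvSeen_contains (kept : List (Int × Int)) (s : Int) :
    (pvSeen kept).contains s = decide (s ∈ kept.map Prod.snd) := by
  simp [pvSeen, PySem.Dict.contains_eq_decide_mem_keys, PySem.Dict.keys]

lemma pvSeen_append (kept : List (Int × Int)) (p : Int × Int)
    (h : p.2 ∉ kept.map Prod.snd) :
    (pvSeen kept).insert p.2 p.1 = pvSeen (kept ++ [p]) := by
  apply PySem.Dict.ext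
  rw [PySem.Dict.items_insert_of_not_contains]
  · simp [pvSeen]
  · simp [pvSeen, PySem.Dict.contains_eq_decide_mem_keys, PySem.Dict.keys]
    simpa using h

lemma pvSeen_rebuild (states : List Int) (kept : List (Int × Int))
    (hnd : (kept.map Prod.snd).Nodup)
    (hget : ∀ q ∈ kept, PySem.List.pyGetD states q.1 0 = q.2) :
    (kept.map Prod.fst).foldl (fun d i => d.insert (PySem.List.pyGetD states i 0) i)
      PySem.Dict.empty = pvSeen kept := by
  apply PySem.Dict.ext
  rw [PySem.Dict.items_foldl_insert_fresh (l := kept.map Prod.fst) (d := PySem.Dict.empty)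
    (k := fun i => PySem.List.pyGetD states i 0) (v := fun i => i)
    (by intro a _; exact PySem.Dict.contains_empty _)
    (by
      rw [List.map_map]
      have : (fun i => PySem.List.pyGetD states i 0) ∘ Prod.fst
          = fun q : Int × Int => PySem.List.pyGetD states q.1 0 := rfl
      rw [this, List.map_congr_left hget] at *
      exact hnd)]
  simp [pvSeen, List.map_map]
  exact List.map_congr_left (fun q hq => by simp [hget q hq])

lemma pvSeen_erase (kept : List (Int × Int)) (q : Int × Int)
    (h : q.2 ∉ kept.map Prod.snd) :
    (pvSeen (kept ++ [q])).erase q.2 = pvSeen kept := by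
  apply PySem.Dict.ext
  simp [pvSeen, PySem.Dict.erase, List.filter_append, List.filter_eq_self]
  exact fun a ha x y hxy hy hx he => h (List.mem_map.mpr ⟨(x, y), hxy, hy.trans he⟩)

lemma pvPopCycle_eq_filter (f : Int) (kept : List (Int × Int))
    (hp : kept.Pairwise (fun a b => a.1 < b.1)) (hnd : (kept.map Prod.snd).Nodup) :
    pvPopCycle f kept (pvSeen kept) =
      (kept.filter (fun q => decide (q.1 ≤ f)),
       pvSeen (kept.filter (fun q => decide (q.1 ≤ f)))) := by
  induction kept using List.reverseRecOn with
  | nil => rw [pvPopCycle]; simp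
  | append_singleton ks q ih =>
    have hq2 : q.2 ∉ ks.map Prod.snd := by
      rw [List.map_append] at hnd
      have hd := (List.nodup_append.mp hnd).2.2
      intro hmem
      exact hd q.2 hmem q.2 (by simp) rfl
    have hks : ks.Pairwise (fun a b => a.1 < b.1) := hp.sublist (by simp)
    have hndks : (ks.map Prod.snd).Nodup := by
      rw [List.map_append] at hnd
      exact (List.nodup_append.mp hnd).1
    have hlast : ∀ r ∈ ks, r.1 < q.1 := by
      intro r hr
      exact (List.pairwise_append.mp hp).2.2 r hr q (by simp)
    rw [pvPopCycle]
    split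
    · rename_i p hpe
      rw [List.getLast?_concat] at hpe
      injection hpe with hpq
      subst hpq
      rw [List.dropLast_concat]
      split
      · rename_i hflt
        rw [pvSeen_erase ks q hq2, ih hks hndks]
        have hqf : (decide (q.1 ≤ f)) = false := by simpa using hflt
        rw [List.filter_append]
        simp [hqf]
      · rename_i hfge
        have hall : ∀ r ∈ ks ++ [q], decide (r.1 ≤ f) = true := by
          intro r hr
          rcases List.mem_append.mp hr with h | h
          · have := hlast r h; simp at hfge ⊢; omega
          · simp at h; subst h; simpa using hfge
        rw [List.filter_eq_self.mpr hall]
    · rename_i hpe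
      rw [List.getLast?_concat] at hpe
      cases hpe

lemma pvStepA_eq (states : List Int) (kept : List (Int × Int)) (p : Int × Int)
    (hinv : pvInv states kept) :
    pvStepA states (pvSeen kept, kept.map Prod.fst) p =
      (pvSeen (pvAbs kept p), (pvAbs kept p).map Prod.fst) := by
  obtain ⟨hpw, hnd, hget⟩ := hinv
  unfold pvStepA pvAbs
  simp only
  split_ifs with hc
  · set f := (pvSeen kept).getD p.2 0 with hf
    have hcl : (kept.map Prod.fst).filter (fun i => decide (i ≤ f))
        = (kept.filter (fun q => decide (q.1 ≤ f))).map Prod.fst := by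
      rw [List.filter_map]; rfl
    rw [hcl, pvSeen_rebuild states _ (hnd.sublist ((List.filter_sublist).map _))
      (fun q hq => hget q (List.mem_of_mem_filter hq))]
  · have hnm : p.2 ∉ kept.map Prod.snd := by
      rw [pvSeen_contains] at hc
      simpa using hc
    rw [pvSeen_append kept p hnm, List.map_append]; rfl

lemma pvStepB_eq (states : List Int) (kept : List (Int × Int)) (p : Int × Int)
    (hinv : pvInv states kept) :
    pvStepB (kept, pvSeen kept) p = (pvAbs kept p, pvSeen (pvAbs kept p)) := by
  obtain ⟨hpw, hnd, hget⟩ := hinv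
  unfold pvStepB pvAbs
  simp only
  split_ifs with hc
  · exact pvPopCycle_eq_filter _ kept hpw hnd
  · have hnm : p.2 ∉ kept.map Prod.snd := by
      rw [pvSeen_contains] at hc
      simpa using hc
    rw [pvSeen_append kept p hnm]

lemma pvAbs_inv (states : List Int) (kept : List (Int × Int)) (p : Int × Int)
    (hinv : pvInv states kept) (hp : PySem.List.pyGetD states p.1 0 = p.2)
    (hlt : ∀ q ∈ kept, q.1 < p.1) :
    pvInv states (pvAbs kept p) ∧ ∀ q ∈ pvAbs kept p, q.1 ≤ p.1 := by
  obtain ⟨hpw, hnd, hget⟩ := hinv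
  unfold pvAbs
  split
  · refine ⟨⟨hpw.sublist List.filter_sublist, ?_, fun q hq => hget q (List.mem_of_mem_filter hq)⟩, ?_⟩
    · exact hnd.sublist (List.filter_sublist.map _)
    · intro q hq
      exact le_of_lt (hlt q (List.mem_of_mem_filter hq))
  · rename_i hc
    have hnm : p.2 ∉ kept.map Prod.snd := by
      rw [pvSeen_contains] at hc
      simpa using hc
    refine ⟨⟨?_, ?_, ?_⟩, ?_⟩
    · exact List.pairwise_append.mpr ⟨hpw, List.pairwise_singleton _ _, by
        intro a ha b hb; simp at hb; subst hb; exact hlt a ha⟩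
    · rw [List.map_append]
      exact List.Nodup.append hnd (by simp) (by
        intro a ha hb; simp at hb; subst hb; exact hnm ha)
    · intro q hq
      rcases List.mem_append.mp hq with h | h
      · exact hget q h
      · simp at h; subst h; exact hp
    · intro q hq
      rcases List.mem_append.mp hq with h | h
      · exact le_of_lt (hlt q h)
      · simp at h; subst h; exact le_refl _

lemma pvMain (states : List Int) (l : List (Int × Int)) (kept : List (Int × Int))
    (hinv : pvInv states kept)
    (hl : ∀ p ∈ l, PySem.List.pyGetD states p.1 0 = p.2)
    (hlt : ∀ q ∈ kept, ∀ p ∈ l, q.1 < p.1)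
    (hpl : l.Pairwise (fun a b => a.1 < b.1)) :
    l.foldl (pvStepA states) (pvSeen kept, kept.map Prod.fst) =
        (pvSeen (l.foldl pvAbs kept), (l.foldl pvAbs kept).map Prod.fst) ∧
      l.foldl pvStepB (kept, pvSeen kept) =
        (l.foldl pvAbs kept, pvSeen (l.foldl pvAbs kept)) := by
  induction l generalizing kept with
  | nil => exact ⟨rfl, rfl⟩
  | cons p l' ih =>
    have hp : PySem.List.pyGetD states p.1 0 = p.2 := hl p (by simp)
    have hlt1 : ∀ q ∈ kept, q.1 < p.1 := fun q hq => hlt q hq p (by simp)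
    obtain ⟨hinv', hle⟩ := pvAbs_inv states kept p hinv hp hlt1
    have hlt' : ∀ q ∈ pvAbs kept p, ∀ r ∈ l', q.1 < r.1 := by
      intro q hq r hr
      have h1 := hle q hq
      have h2 : p.1 < r.1 := (List.pairwise_cons.mp hpl).1 r hr
      omega
    have := ih (pvAbs kept p) hinv' (fun r hr => hl r (by simp [hr])) hlt'
      (List.pairwise_cons.mp hpl).2
    simpa [List.foldl_cons, pvStepA_eq states kept p hinv, pvStepB_eq states kept p hinv]
      using this

-- ===== VERDICT (by name: the statement is the Claim_ definition above) =====
theorem remove_circular_states_indices_py_spec : Claim_equal_remove_circular_states_indices_py := by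
  intro states _
  unfold Spec_remove_circular_states_indices_py
  unfold remove_circular_states_indices_py remove_circular_states_indices_py_alt
  have hmain := pvMain states (PySem.List.enumerate states) []
    ⟨List.Pairwise.nil, List.nodup_nil, by simp⟩
    (by
      intro p hp
      obtain ⟨k, hk, rfl⟩ := (PySem.List.mem_enumerate_iff states 0 p).mp hp
      simp [PySem.List.pyGetD_natCast, List.getElem?_eq_getElem hk])
    (by simp) (PySem.List.pairwise_lt_enumerate states 0)
  have h0 : pvSeen [] = PySem.Dict.empty := rfl
  rw [h0] at hmain
  simp only [List.map_nil] at hmain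
  rw [hmain.1, hmain.2]
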